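-- pv_equiv track=rewrite | github.com/HemanthReddy1728/IIITH | SEM 1/DSAPS/Assignments/1/seam.py | findVerticalSeam
-- ===== SOURCE A (Python) =====
-- import copy
--
-- def findVerticalSeam(energy):
--     height = len(energy)
--     width = len(energy[0])
--     ver_ener = copy.deepcopy(energy)#energy.copy()
--     for h in range(height-2,-1,-1):
--         for w in range(width):
--             if w!=0 and w!=width-1:
--                 ver_ener[h][w] += min(ver_ener[h+1][w-1],ver_ener[h+1][w],ver_ener[h+1][w+1])
--             elif w==0:
--                 ver_ener[h][w] += min(ver_ener[h+1][w],ver_ener[h+1][w+1])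
--             else:
--                 ver_ener[h][w] += min(ver_ener[h+1][w-1],ver_ener[h+1][w])
--
--     rem_coord = [ver_ener[0].index(min(ver_ener[0]))]
--
--     for h in range(1,height):
--         if rem_coord[-1] != 0 and rem_coord[-1] != width - 1:
--             next_w = min(rem_coord[-1] - 1, rem_coord[-1], rem_coord[-1] + 1, key=lambda wt: ver_ener[h][wt])
--             rem_coord.append(next_w)
--         elif rem_coord[-1] == 0:
--             next_w = min(rem_coord[-1], rem_coord[-1] + 1, key=lambda wt: ver_ener[h][wt])
--             rem_coord.append(next_w)
--         else:
--             next_w = min(rem_coord[-1] - 1, rem_coord[-1], key=lambda wt: ver_ener[h][wt])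
--             rem_coord.append(next_w)
--
--     return rem_coord
-- ===== SOURCE B (Python) =====
-- def findVerticalSeam(energy):
--     width = len(energy[0])
--     # bottom-up DP: dp holds cumulative energies of the row below; record
--     # for each cell the column in the next row achieving the (leftmost) min
--     dp = list(energy[-1][:width])
--     parent_rows = []
--     for row in reversed(energy[:-1]):
--         par = []
--         new = []
--         for w in range(width):
--             lo = 0 if w == 0 else w - 1
--             hi = w if w == width - 1 else w + 1
--             best = lo
--             for c in range(lo + 1, hi + 1):
--                 if dp[c] < dp[best]:
--                     best = c
--             par.append(best)
--             new.append(row[w] + dp[best])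
--         parent_rows.append(par)
--         dp = new
--     c = dp.index(min(dp))
--     seam = [c]
--     for par in reversed(parent_rows):
--         c = par[c]
--         seam.append(c)
--     return seam
-- ===== Notes on version B (the rewrite author's own statement) =====
-- stated objective: alternative
-- what changed: B records, during the single bottom-up DP fill, which neighbour column of the row below achieves each cell's minimum (a parent-pointer table built from freshly constructed rows instead of A's in-place deepcopy mutation), and then traces the seam by following those stored pointers, eliminating A's second pass of re-computed keyed minima.
-- outside the precondition, e.g. on findVerticalSeam([[3], [3, -3, -4]]): A returns [0, 1], B returns [0, 0]
import Mathlib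
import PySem

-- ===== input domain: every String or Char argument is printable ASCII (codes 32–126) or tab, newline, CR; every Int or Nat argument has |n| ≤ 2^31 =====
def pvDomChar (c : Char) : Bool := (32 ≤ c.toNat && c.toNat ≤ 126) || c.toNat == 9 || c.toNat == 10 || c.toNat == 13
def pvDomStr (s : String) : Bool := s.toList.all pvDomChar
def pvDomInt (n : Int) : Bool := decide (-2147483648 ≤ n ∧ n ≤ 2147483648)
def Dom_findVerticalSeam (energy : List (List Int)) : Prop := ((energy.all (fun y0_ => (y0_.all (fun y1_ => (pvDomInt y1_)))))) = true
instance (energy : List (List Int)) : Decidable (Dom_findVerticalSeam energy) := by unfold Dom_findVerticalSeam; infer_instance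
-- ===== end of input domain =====

-- B replaces A's second pass of re-computed neighbour minima by parent pointers recorded
-- during the single bottom-up DP fill; same return value (objective: alternative, no speed claim).

-- ===== PORT A =====
-- copy.deepcopy(energy) is the identity on an immutable value; indexing/assignment is in
-- range on Pre_, so pyGetD/pySetD (total forms) are exact there.
def findVerticalSeam (energy : List (List Int)) : List Int :=
  let height : Int := PySem.List.len energy
  let width : Int := PySem.List.len (PySem.List.pyGetD energy 0 [])
  let ver := (PySem.List.pyRange (height-2) (-1) (-1)).foldl (fun t h =>
    (PySem.List.pyRange 0 width 1).foldl (fun t w =>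
      let rowh := PySem.List.pyGetD t h []
      let below := PySem.List.pyGetD t (h+1) []
      let v :=
        if w ≠ 0 ∧ w ≠ width - 1 then
          PySem.List.pyGetD rowh w 0 +
            min (PySem.List.pyGetD below (w-1) 0)
              (min (PySem.List.pyGetD below w 0) (PySem.List.pyGetD below (w+1) 0))
        else if w = 0 then
          PySem.List.pyGetD rowh w 0 +
            min (PySem.List.pyGetD below w 0) (PySem.List.pyGetD below (w+1) 0)
        else
          PySem.List.pyGetD rowh w 0 +
            min (PySem.List.pyGetD below (w-1) 0) (PySem.List.pyGetD below w 0)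
      PySem.List.pySetD t h (PySem.List.pySetD rowh w v)) t) energy
  let row0 := PySem.List.pyGetD ver 0 []
  let rem0 : List Int :=
    [((PySem.List.index? row0 ((PySem.List.min? row0 (fun x => x)).getD 0)).getD 0 : Nat)]
  (PySem.List.pyRange 1 height 1).foldl (fun rem h =>
    let rowh := PySem.List.pyGetD ver h []
    let last := PySem.List.pyGetD rem (-1) 0
    let key := fun (wt : Int) => PySem.List.pyGetD rowh wt 0
    let next :=
      if last ≠ 0 ∧ last ≠ width - 1 then
        PySem.List.minD [last - 1, last, last + 1] key 0
      else if last = 0 then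
        PySem.List.minD [last, last + 1] key 0
      else
        PySem.List.minD [last - 1, last] key 0
    rem ++ [next]) rem0

-- ===== PORT B =====
-- Source B appends parent rows bottom-up and traces over reversed(parent_rows); consing each
-- parent row builds exactly that reversed list, so the trace folds over it directly.
def findVerticalSeam_alt (energy : List (List Int)) : List Int :=
  let width := (PySem.List.pyGetD energy 0 []).length
  let dp0 := (PySem.List.pyGetD energy (-1) []).take width
  let st := ((PySem.List.slice energy none (some (-1))).reverse).foldl
    (fun (st : List Int × List (List Nat)) row =>
      let dp := st.1
      let par := (List.range width).map (fun w =>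
        let lo := if w = 0 then 0 else w - 1
        let hi := if w = width - 1 then w else w + 1
        (List.range' (lo+1) (hi-lo)).foldl
          (fun best c => if dp.getD c 0 < dp.getD best 0 then c else best) lo)
      let nrow := (List.range width).map (fun w => row.getD w 0 + dp.getD (par.getD w 0) 0)
      (nrow, par :: st.2)) (dp0, ([] : List (List Nat)))
  let c0 := (PySem.List.index? st.1 ((PySem.List.min? st.1 (fun x => x)).getD 0)).getD 0
  (st.2.foldl (fun (s : List Int × Nat) par =>
      let c : Nat := par.getD s.2 0
      (s.1 ++ [(c : Int)], c)) ([(c0 : Int)], c0)).1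

-- ===== PRECONDITION & SPEC =====
-- Pre_ restricts to the function's natural domain of grids: a nonempty grid with a nonempty
-- first row, and (unless there is a single row) at least two columns with every row at least
-- as long as the first.  Outside it A raises (empty grid/row, a later row shorter than the
-- first, a rectangular single-column multi-row grid), except for single-column grids whose
-- lower rows are longer: there A reads those rows' overflow columns and returns column
-- indices outside the single-column grid (no seam of the grid), which B does not reproduce.
def Pre_findVerticalSeam (energy : List (List Int)) : Prop :=
  energy ≠ [] ∧ (energy.headD []) ≠ [] ∧
    (energy.length = 1 ∨
      (2 ≤ (energy.headD []).length ∧ ∀ r ∈ energy, (energy.headD []).length ≤ r.length))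
instance (energy : List (List Int)) : Decidable (Pre_findVerticalSeam energy) := by
  unfold Pre_findVerticalSeam; infer_instance

def pvWitness_findVerticalSeam : List (List Int) := [[1, 2], [3, 4]]

def Spec_findVerticalSeam (energy : List (List Int)) (out : List Int) : Prop :=
  out = findVerticalSeam_alt energy
instance (energy : List (List Int)) (out : List Int) : Decidable (Spec_findVerticalSeam energy out) := by
  unfold Spec_findVerticalSeam; infer_instance

-- ===== CLAIM (what is proved, stated in full; the proofs are below) =====
def Claim_equal_findVerticalSeam : Prop := ∀ (energy : List (List Int)),
  Dom_findVerticalSeam energy → Pre_findVerticalSeam energy →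
    Spec_findVerticalSeam energy (findVerticalSeam energy)

-- ===== LEMMAS AND PROOFS =====

-- the cumulative minimum A adds at column w, read from the (final) row below
def nminP (b : List Int) (W w : Nat) : Int :=
  if w ≠ 0 ∧ w ≠ W - 1 then min (b.getD (w-1) 0) (min (b.getD w 0) (b.getD (w+1) 0))
  else if w = 0 then min (b.getD w 0) (b.getD (w+1) 0)
  else min (b.getD (w-1) 0) (b.getD w 0)

-- B's leftmost argmin over the neighbour window
def pickP (b : List Int) (W w : Nat) : Nat :=
  let lo := if w = 0 then 0 else w - 1
  let hi := if w = W - 1 then w else w + 1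
  (List.range' (lo+1) (hi-lo)).foldl
    (fun best c => if b.getD c 0 < b.getD best 0 then c else best) lo

def dpRowP (r b : List Int) (W : Nat) : List Int :=
  (List.range W).map (fun w => r.getD w 0 + nminP b W w)

def parRowP (b : List Int) (W : Nat) : List Nat := (List.range W).map (pickP b W)

-- the DP table with width-truncated rows, built structurally
def dpRowsP (W : Nat) : List (List Int) → List (List Int)
  | [] => []
  | r :: t => match dpRowsP W t with
    | [] => [r.take W]
    | d :: ds => dpRowP r d W :: d :: ds

def parsP (W : Nat) : List (List Int) → List (List Nat)
  | [] => []
  | _ :: t => match dpRowsP W t with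
    | [] => []
    | d :: _ => parRowP d W :: parsP W t

-- A's literal in-place fill of one row (the inner w-loop acting on the row alone)
def fillRowP (W : Int) (b r : List Int) : List Int :=
  (PySem.List.pyRange 0 W 1).foldl (fun ρ w =>
    let v :=
      if w ≠ 0 ∧ w ≠ W - 1 then
        PySem.List.pyGetD ρ w 0 +
          min (PySem.List.pyGetD b (w-1) 0)
            (min (PySem.List.pyGetD b w 0) (PySem.List.pyGetD b (w+1) 0))
      else if w = 0 then
        PySem.List.pyGetD ρ w 0 +
          min (PySem.List.pyGetD b w 0) (PySem.List.pyGetD b (w+1) 0)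
      else
        PySem.List.pyGetD ρ w 0 +
          min (PySem.List.pyGetD b (w-1) 0) (PySem.List.pyGetD b w 0)
    PySem.List.pySetD ρ w v) r

-- A's fill loop as structural recursion on the rows
def tabOfP (W : Int) : List (List Int) → List (List Int)
  | [] => []
  | r :: t => match tabOfP W t with
    | [] => [r]
    | d :: ds => fillRowP W d r :: d :: ds

-- named pieces of the two ports (each equal to the port by rfl, see pvA_unfold/pvB_unfold)
def pvFtab (W : Int) (t : List (List Int)) (h : Int) : List (List Int) :=
  (PySem.List.pyRange 0 W 1).foldl (fun t w =>
    let rowh := PySem.List.pyGetD t h []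
    let below := PySem.List.pyGetD t (h+1) []
    let v :=
      if w ≠ 0 ∧ w ≠ W - 1 then
        PySem.List.pyGetD rowh w 0 +
          min (PySem.List.pyGetD below (w-1) 0)
            (min (PySem.List.pyGetD below w 0) (PySem.List.pyGetD below (w+1) 0))
      else if w = 0 then
        PySem.List.pyGetD rowh w 0 +
          min (PySem.List.pyGetD below w 0) (PySem.List.pyGetD below (w+1) 0)
      else
        PySem.List.pyGetD rowh w 0 +
          min (PySem.List.pyGetD below (w-1) 0) (PySem.List.pyGetD below w 0)
    PySem.List.pySetD t h (PySem.List.pySetD rowh w v)) t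

def pvVer (e : List (List Int)) : List (List Int) :=
  (PySem.List.pyRange ((PySem.List.len e)-2) (-1) (-1)).foldl
    (pvFtab (PySem.List.len (PySem.List.pyGetD e 0 []))) e

def pvStart (row0 : List Int) : Nat :=
  (PySem.List.index? row0 ((PySem.List.min? row0 (fun x => x)).getD 0)).getD 0

def pvTraceARow (W : Int) (rem rowh : List Int) : List Int :=
  let last := PySem.List.pyGetD rem (-1) 0
  let key := fun (wt : Int) => PySem.List.pyGetD rowh wt 0
  let next :=
    if last ≠ 0 ∧ last ≠ W - 1 then
      PySem.List.minD [last - 1, last, last + 1] key 0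
    else if last = 0 then
      PySem.List.minD [last, last + 1] key 0
    else
      PySem.List.minD [last - 1, last] key 0
  rem ++ [next]

def pvStepB (W : Nat) (st : List Int × List (List Nat)) (row : List Int) :
    List Int × List (List Nat) :=
  let dp := st.1
  let par := (List.range W).map (fun w =>
    let lo := if w = 0 then 0 else w - 1
    let hi := if w = W - 1 then w else w + 1
    (List.range' (lo+1) (hi-lo)).foldl
      (fun best c => if dp.getD c 0 < dp.getD best 0 then c else best) lo)
  let nrow := (List.range W).map (fun w => row.getD w 0 + dp.getD (par.getD w 0) 0)
  (nrow, par :: st.2)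

def pvStB (e : List (List Int)) : List Int × List (List Nat) :=
  ((PySem.List.slice e none (some (-1))).reverse).foldl
    (pvStepB (PySem.List.pyGetD e 0 []).length)
    ((PySem.List.pyGetD e (-1) []).take (PySem.List.pyGetD e 0 []).length, [])

def pvTraceBStep (s : List Int × Nat) (par : List Nat) : List Int × Nat :=
  let c : Nat := par.getD s.2 0
  (s.1 ++ [(c : Int)], c)

theorem pvA_unfold (e : List (List Int)) : findVerticalSeam e =
    (PySem.List.pyRange 1 (PySem.List.len e) 1).foldl
      (fun rem h => pvTraceARow (PySem.List.len (PySem.List.pyGetD e 0 []))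
        rem (PySem.List.pyGetD (pvVer e) h []))
      [(pvStart (PySem.List.pyGetD (pvVer e) 0 []) : Int)] := rfl

theorem pvB_unfold (e : List (List Int)) : findVerticalSeam_alt e =
    ((pvStB e).2.foldl pvTraceBStep
      ([(pvStart (pvStB e).1 : Int)], pvStart (pvStB e).1)).1 := rfl

-- ---- generic fold lemmas ----
theorem pvFoldlHomMem {α β γ : Type} (F : β → α → β) (G : γ → α → γ) (φ : γ → β) :
    ∀ (l : List α), (∀ s a, a ∈ l → F (φ s) a = φ (G s a)) → ∀ s,
      List.foldl F (φ s) l = φ (List.foldl G s l)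
  | [], _, s => rfl
  | a :: l, h, s => by
    simp only [List.foldl_cons]
    rw [h s a (by simp)]
    exact pvFoldlHomMem F G φ l (fun s a ha => h s a (by simp [ha])) _

theorem pvFoldlRel {α α' β γ : Type} (R : β → γ → Prop) (S : α → α' → Prop)
    (f : β → α → β) (g : γ → α' → γ)
    (hstep : ∀ b c a a', S a a' → R b c → R (f b a) (g c a')) :
    ∀ {l : List α} {l' : List α'}, List.Forall₂ S l l' → ∀ {b c}, R b c →
      R (l.foldl f b) (l'.foldl g c) := by
  intro l l' hf
  induction hf with
  | nil => intro b c h; exact h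
  | cons ha _ ih => intro b c h; exact ih (hstep _ _ _ _ ha h)

-- ---- index shifting ----
theorem pvGetD_cons_pos {α : Type} (x : α) (l : List α) (i : Int) (d : α) (h : 1 ≤ i) :
    PySem.List.pyGetD (x :: l) i d = PySem.List.pyGetD l (i-1) d := by
  rw [PySem.List.pyGetD_of_nonneg _ _ (by omega), PySem.List.pyGetD_of_nonneg _ _ (by omega)]
  have : i.toNat = (i-1).toNat + 1 := by omega
  rw [this]; rfl

theorem pvSetD_cons_pos {α : Type} (x : α) (l : List α) (i : Int) (v : α) (h : 1 ≤ i) :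
    PySem.List.pySetD (x :: l) i v = x :: PySem.List.pySetD l (i-1) v := by
  rw [PySem.List.pySetD_of_nonneg _ _ (by omega), PySem.List.pySetD_of_nonneg _ _ (by omega)]
  have : i.toNat = (i-1).toNat + 1 := by omega
  rw [this]; rfl

theorem pvSetD_zero {α : Type} (x : α) (l : List α) (v : α) :
    PySem.List.pySetD (x :: l) 0 v = v :: l := by
  rw [PySem.List.pySetD_of_nonneg _ _ (by omega)]; rfl

-- ---- countdown range splitting / shifting ----
theorem pvRangeSplit (a : Int) (h : 0 ≤ a) :
    PySem.List.pyRange a (-1) (-1) = PySem.List.pyRange a 0 (-1) ++ [0] := by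
  rw [PySem.List.pyRange_neg_one, PySem.List.pyRange_neg_one]
  have h1 : (a - -1).toNat = (a - 0).toNat + 1 := by omega
  rw [h1, List.range_succ]
  simp; omega

theorem pvShiftFold {β : Type} (F : β → Int → β) (a : Int) (s : β) :
    (PySem.List.pyRange a 0 (-1)).foldl (fun u h' => F u (h' - 1)) s
      = (PySem.List.pyRange (a-1) (-1) (-1)).foldl F s := by
  rw [PySem.List.pyRange_neg_one, PySem.List.pyRange_neg_one]
  have h1 : (a - 0).toNat = (a - 1 - -1).toNat := by omega
  rw [List.foldl_map, List.foldl_map, h1]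
  have h2 : (fun (u : β) (k : Nat) => F u (a - k - 1)) = fun (u : β) (k : Nat) => F u (a - 1 - k) := by
    funext u k; congr 1; omega
  rw [h2]

-- ---- argmin window lemmas ----
theorem pvPickCases (b : List Int) (W w : Nat) (hW : 2 ≤ W) (hw : w < W) :
    pickP b W w =
      if w = 0 then (if b.getD 1 0 < b.getD 0 0 then 1 else 0)
      else if w = W - 1 then (if b.getD w 0 < b.getD (w-1) 0 then w else w-1)
      else (if b.getD (w+1) 0 < b.getD (if b.getD w 0 < b.getD (w-1) 0 then w else w-1) 0 then w+1
            else (if b.getD w 0 < b.getD (w-1) 0 then w else w-1)) := by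
  unfold pickP
  by_cases h0 : w = 0
  · subst h0
    have hne : (0:Nat) ≠ W - 1 := by omega
    simp only [if_neg hne]
    norm_num [List.range']
  · by_cases h1 : w = W - 1
    · simp only [if_neg h0, if_pos h1]
      rw [show w - (w-1) = 1 from by omega, show w - 1 + 1 = w from by omega]
      simp [List.range']
    · simp only [if_neg h0, if_neg h1]
      rw [show w + 1 - (w-1) = 2 from by omega, show w - 1 + 1 = w from by omega]
      simp [List.range', List.foldl]
theorem pvPickLt (b : List Int) (W w : Nat) (hW : 2 ≤ W) (hw : w < W) : pickP b W w < W := by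
  rw [pvPickCases b W w hW hw]
  split_ifs <;> omega

theorem pvPickVal (b : List Int) (W w : Nat) (hW : 2 ≤ W) (hw : w < W) :
    b.getD (pickP b W w) 0 = nminP b W w := by
  rw [pvPickCases b W w hW hw]; unfold nminP
  by_cases h0 : w = 0
  · subst h0
    rw [if_pos rfl, if_neg (show ¬((0:Nat) ≠ 0 ∧ (0:Nat) ≠ W - 1) from by omega), if_pos rfl]
    simp only [min_def, Nat.zero_add]; split_ifs <;> first | rfl | omega
  · by_cases h1 : w = W - 1
    · rw [if_neg h0, if_pos h1, if_neg (show ¬(w ≠ 0 ∧ w ≠ W - 1) from by omega), if_neg h0]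
      simp only [min_def]; split_ifs <;> first | rfl | omega
    · rw [if_neg h0, if_neg h1, if_pos (show (w ≠ 0 ∧ w ≠ W - 1) from ⟨h0, h1⟩)]
      simp only [min_def]
      split_ifs <;> first | rfl | omega
theorem pvNminCongr (a d : List Int) (W w : Nat) (hW : 2 ≤ W) (hw : w < W)
    (hag : ∀ j < W, a.getD j 0 = d.getD j 0) : nminP a W w = nminP d W w := by
  unfold nminP
  by_cases h0 : w = 0
  · subst h0
    rw [if_neg (show ¬((0:Nat) ≠ 0 ∧ (0:Nat) ≠ W - 1) from by omega), if_pos rfl,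
      if_neg (show ¬((0:Nat) ≠ 0 ∧ (0:Nat) ≠ W - 1) from by omega), if_pos rfl,
      hag 0 (by omega), hag (0+1) (by omega)]
  · by_cases h1 : w = W - 1
    · rw [if_neg (show ¬(w ≠ 0 ∧ w ≠ W - 1) from by omega), if_neg h0,
        if_neg (show ¬(w ≠ 0 ∧ w ≠ W - 1) from by omega), if_neg h0,
        hag (w-1) (by omega), hag w (by omega)]
    · rw [if_pos ⟨h0, h1⟩, if_pos ⟨h0, h1⟩, hag (w-1) (by omega), hag w (by omega),
        hag (w+1) (by omega)]

theorem pvAstepEq (a d : List Int) (W c : Nat) (hW : 2 ≤ W) (hc : c < W)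
    (hag : ∀ j < W, a.getD j 0 = d.getD j 0) :
    (if (c:Int) ≠ 0 ∧ (c:Int) ≠ (W:Int) - 1 then
        PySem.List.minD [(c:Int) - 1, (c:Int), (c:Int) + 1]
          (fun wt => PySem.List.pyGetD a wt 0) 0
      else if (c:Int) = 0 then
        PySem.List.minD [(c:Int), (c:Int) + 1] (fun wt => PySem.List.pyGetD a wt 0) 0
      else PySem.List.minD [(c:Int) - 1, (c:Int)] (fun wt => PySem.List.pyGetD a wt 0) 0)
    = ((pickP d W c : Nat) : Int) := by
  rw [pvPickCases d W c hW hc]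
  have e0 : PySem.List.pyGetD a (c:Int) 0 = d.getD c 0 := by
    rw [PySem.List.pyGetD_natCast, hag c hc]
  have e1 : c ≠ 0 → PySem.List.pyGetD a ((c:Int) - 1) 0 = d.getD (c-1) 0 := by
    intro h
    rw [show ((c:Int) - 1) = (((c-1:Nat)):Int) from by push_cast [h]; omega,
      PySem.List.pyGetD_natCast, hag (c-1) (by omega)]
  have e2 : c + 1 < W → PySem.List.pyGetD a ((c:Int) + 1) 0 = d.getD (c+1) 0 := by
    intro h
    rw [show ((c:Int) + 1) = (((c+1:Nat)):Int) from by push_cast; ring,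
      PySem.List.pyGetD_natCast, hag (c+1) h]
  by_cases h0 : c = 0
  · subst h0
    rw [if_neg (by norm_num), if_pos (by norm_num), if_pos rfl]
    simp only [PySem.List.minD, PySem.List.min?, List.foldl, e0, e2 (by omega)]
    split_ifs <;> simp only [Option.getD_some] <;> push_cast <;> omega
  · by_cases h1 : c = W - 1
    · rw [if_neg (by push_cast [h0, h1]; omega), if_neg (by push_cast [h0]; omega),
        if_neg h0, if_pos h1]
      simp only [PySem.List.minD, PySem.List.min?, List.foldl, e0, e1 h0]
      split_ifs <;> simp only [Option.getD_some] <;> push_cast <;> omega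
    · rw [if_pos (by constructor <;> push_cast [h0] <;> omega), if_neg h0, if_neg h1]
      simp only [PySem.List.minD, PySem.List.min?, List.foldl, e0, e1 h0]
      by_cases hm : d.getD c 0 < d.getD (c-1) 0
      · simp only [if_pos hm, e0]
        split_ifs <;> simp only [Option.getD_some] <;> push_cast <;> omega
      · simp only [if_neg hm, e1 h0]
        split_ifs <;> simp only [Option.getD_some] <;> push_cast <;> omega

-- ---- the inner w-loop acting on one row ----
theorem pvFillAux (b : List Int) (Wn : Nat) (hW : 2 ≤ Wn) :
    ∀ (n k : Nat), k + n = Wn → ∀ (ρ : List Int), Wn ≤ ρ.length →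
      (PySem.List.pyRange (k:Int) (Wn:Int) 1).foldl (fun ρ w =>
        let v :=
          if w ≠ 0 ∧ w ≠ (Wn:Int) - 1 then
            PySem.List.pyGetD ρ w 0 +
              min (PySem.List.pyGetD b (w-1) 0)
                (min (PySem.List.pyGetD b w 0) (PySem.List.pyGetD b (w+1) 0))
          else if w = 0 then
            PySem.List.pyGetD ρ w 0 +
              min (PySem.List.pyGetD b w 0) (PySem.List.pyGetD b (w+1) 0)
          else
            PySem.List.pyGetD ρ w 0 +
              min (PySem.List.pyGetD b (w-1) 0) (PySem.List.pyGetD b w 0)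
        PySem.List.pySetD ρ w v) ρ
        = ρ.take k ++ (List.range' k n).map (fun w => ρ.getD w 0 + nminP b Wn w) ++ ρ.drop Wn
  | 0, k, hkn, ρ, hρ => by
    rw [PySem.List.pyRange_one_eq_nil (by omega)]
    simp [List.take_append_drop, show k = Wn from by omega]
  | n+1, k, hkn, ρ, hρ => by
    rw [PySem.List.pyRange_one_cons (by exact_mod_cast (by omega : (k:Int) < (Wn:Int)))]
    simp only [List.foldl_cons]
    have hkW : k < Wn := by omega
    have hbody : (if (k:Int) ≠ 0 ∧ (k:Int) ≠ (Wn:Int) - 1 then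
            PySem.List.pyGetD ρ (k:Int) 0 +
              min (PySem.List.pyGetD b ((k:Int)-1) 0)
                (min (PySem.List.pyGetD b (k:Int) 0) (PySem.List.pyGetD b ((k:Int)+1) 0))
          else if (k:Int) = 0 then
            PySem.List.pyGetD ρ (k:Int) 0 +
              min (PySem.List.pyGetD b (k:Int) 0) (PySem.List.pyGetD b ((k:Int)+1) 0)
          else
            PySem.List.pyGetD ρ (k:Int) 0 +
              min (PySem.List.pyGetD b ((k:Int)-1) 0) (PySem.List.pyGetD b (k:Int) 0))
        = ρ.getD k 0 + nminP b Wn k := by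
      unfold nminP
      by_cases h0 : k = 0
      · subst h0
        rw [if_neg (by norm_num), if_pos (by norm_num),
          if_neg (show ¬((0:Nat) ≠ 0 ∧ (0:Nat) ≠ Wn - 1) from by omega), if_pos rfl]
        norm_num
        simp [PySem.List.pyGetD, PySem.List.pyGet?, PySem.List.pyIdx?]
        split_ifs <;> simp_all
      · by_cases h1 : k = Wn - 1
        · rw [if_neg (by push_cast [h0]; omega), if_neg (by push_cast [h0]; omega),
            if_neg (show ¬(k ≠ 0 ∧ k ≠ Wn - 1) from by omega), if_neg h0,
            show ((k:Int) - 1) = (((k-1:Nat)):Int) from by push_cast [h0]; omega]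
          simp only [PySem.List.pyGetD_natCast]
        · rw [if_pos (by constructor <;> push_cast [h0] <;> omega),
            if_pos (show (k ≠ 0 ∧ k ≠ Wn - 1) from ⟨h0, h1⟩),
            show ((k:Int) - 1) = (((k-1:Nat)):Int) from by push_cast [h0]; omega,
            show ((k:Int) + 1) = (((k+1:Nat)):Int) from by push_cast; ring]
          simp only [PySem.List.pyGetD_natCast]
    rw [hbody, PySem.List.pySetD_natCast,
      show ((k:Int) + 1) = (((k+1:Nat)):Int) from by push_cast; ring,
      pvFillAux b Wn hW n (k+1) (by omega) _ (by rw [List.length_set]; exact hρ)]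
    have hlt : k < ρ.length := by omega
    rw [show (ρ.set k (ρ.getD k 0 + nminP b Wn k)).take (k+1) = ρ.take k ++ [ρ.getD k 0 + nminP b Wn k] from by
        rw [List.set_eq_take_cons_drop _ hlt, List.take_append]
        simp [List.length_take, Nat.min_eq_left hlt.le],
      show (ρ.set k (ρ.getD k 0 + nminP b Wn k)).drop Wn = ρ.drop Wn from by
        rw [List.drop_set_of_lt]; omega,
      show (List.range' (k+1) n).map (fun w => (ρ.set k (ρ.getD k 0 + nminP b Wn k)).getD w 0 + nminP b Wn w)
          = (List.range' (k+1) n).map (fun w => ρ.getD w 0 + nminP b Wn w) from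
        List.map_congr_left (by
          intro w hw
          have : k ≠ w := by have := List.mem_range'.mp hw; omega
          simp [List.getD, List.getElem?_set_ne this]),
      List.range'_succ]
    simp

theorem pvFillRowEq (b r : List Int) (Wn : Nat) (hW : 2 ≤ Wn) (hr : Wn ≤ r.length) :
    fillRowP (Wn:Int) b r = dpRowP r b Wn ++ r.drop Wn := by
  unfold fillRowP
  have h := pvFillAux b Wn hW Wn 0 (by omega) r hr
  rw [show ((0:Nat):Int) = (0:Int) from rfl] at h
  rw [h]
  simp [dpRowP, List.range_eq_range']

-- ---- structural characterisation of the two table builds ----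
theorem pvDpRowsNeNil (W : Nat) (e : List (List Int)) (h : e ≠ []) : dpRowsP W e ≠ [] := by
  cases e with
  | nil => simp at h
  | cons r t => unfold dpRowsP; cases dpRowsP W t <;> simp

theorem pvDpRowsCons (W : Nat) (r : List Int) (t : List (List Int)) (h : t ≠ []) :
    dpRowsP W (r :: t) = dpRowP r ((dpRowsP W t).getD 0 []) W :: dpRowsP W t := by
  cases hd : dpRowsP W t with
  | nil => exact absurd hd (pvDpRowsNeNil W t h)
  | cons d ds => simp [dpRowsP, hd]

theorem pvParsCons (W : Nat) (r : List Int) (t : List (List Int)) (h : t ≠ []) :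
    parsP W (r :: t) = parRowP ((dpRowsP W t).getD 0 []) W :: parsP W t := by
  cases hd : dpRowsP W t with
  | nil => exact absurd hd (pvDpRowsNeNil W t h)
  | cons d ds => simp [parsP, hd]

theorem pvTabNeNil (W : Int) (e : List (List Int)) (h : e ≠ []) : tabOfP W e ≠ [] := by
  cases e with
  | nil => simp at h
  | cons r t => unfold tabOfP; cases tabOfP W t <;> simp

theorem pvTabCons (W : Int) (r : List Int) (t : List (List Int)) (h : t ≠ []) :
    tabOfP W (r :: t) = fillRowP W ((tabOfP W t).getD 0 []) r :: tabOfP W t := by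
  cases hd : tabOfP W t with
  | nil => exact absurd hd (pvTabNeNil W t h)
  | cons d ds => simp [tabOfP, hd]

theorem pvTabLen (W : Int) : ∀ (e : List (List Int)), (tabOfP W e).length = e.length
  | [] => rfl
  | r :: t => by
    cases ht : t with
    | nil => simp [tabOfP]
    | cons s t' =>
      rw [← ht, pvTabCons W r t (by simp [ht])]
      simp [pvTabLen W t]

theorem pvParsEq (W : Nat) : ∀ (e : List (List Int)),
    parsP W e = (dpRowsP W e).tail.map (fun d => parRowP d W)
  | [] => rfl
  | r :: t => by
    cases ht : t with
    | nil => simp [parsP, dpRowsP]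
    | cons s t' =>
      rw [← ht, pvParsCons W r t (by simp [ht]), pvDpRowsCons W r t (by simp [ht])]
      cases hd : dpRowsP W t with
      | nil => exact absurd hd (pvDpRowsNeNil W t (by simp [ht]))
      | cons d ds =>
        have := pvParsEq W t
        rw [hd] at this
        simp [this]

-- ---- the two fold shapes of A's fill loop ----
theorem pvFtabShift (W : Int) (r : List Int) (u : List (List Int)) (h : Int) (hh : 1 ≤ h) :
    pvFtab W (r :: u) h = r :: pvFtab W u (h - 1) := by
  unfold pvFtab
  refine pvFoldlHomMem _ _ (fun s => r :: s) _ (fun s w _ => ?_) u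
  simp only [pvGetD_cons_pos _ _ h _ hh, pvGetD_cons_pos _ _ (h+1) _ (by omega),
    pvSetD_cons_pos _ _ h _ hh]
  rw [show h + 1 - 1 = h - 1 + 1 from by ring]

theorem pvFtabZero (W : Int) (r : List Int) (u : List (List Int)) :
    pvFtab W (r :: u) 0 = fillRowP W (PySem.List.pyGetD u 0 []) r :: u := by
  unfold pvFtab fillRowP
  refine pvFoldlHomMem _ _ (fun ρ => ρ :: u) _ (fun ρ w _ => ?_) r
  simp only [PySem.List.pyGetD_zero_cons, pvGetD_cons_pos _ _ (0+1) _ (by omega)]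
  norm_num [pvSetD_zero]

theorem pvAFill (W : Int) : ∀ (e : List (List Int)),
    (PySem.List.pyRange ((PySem.List.len e) - 2) (-1) (-1)).foldl (pvFtab W) e = tabOfP W e
  | [] => by
    rw [PySem.List.pyRange_neg_one_eq_nil (by simp [PySem.List.len_eq])]
    rfl
  | [r] => by
    rw [PySem.List.pyRange_neg_one_eq_nil (by simp [PySem.List.len_eq])]
    simp [tabOfP]
  | r :: s :: t' => by
    have hlen : PySem.List.len (r :: s :: t') = ((t'.length : Int) + 2) := by
      simp [PySem.List.len_eq]; push_cast; ring
    rw [hlen, show ((t'.length : Int) + 2 - 2) = (t'.length : Int) from by ring,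
      pvRangeSplit _ (by positivity), List.foldl_append]
    have hshift : (PySem.List.pyRange (t'.length : Int) 0 (-1)).foldl (pvFtab W) (r :: s :: t')
        = r :: (PySem.List.pyRange ((t'.length : Int) - 1) (-1) (-1)).foldl (pvFtab W) (s :: t') := by
      rw [← pvShiftFold (pvFtab W) (t'.length : Int) (s :: t')]
      refine pvFoldlHomMem _ _ (fun u => r :: u) _ (fun u h hmem => ?_) (s :: t')
      have := (PySem.List.mem_pyRange_neg_one).mp hmem
      exact pvFtabShift W r u h (by omega)
    have hlen2 : ((t'.length : Int) - 1) = PySem.List.len (s :: t') - 2 := by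
      simp [PySem.List.len_eq]; push_cast; ring
    rw [hshift, hlen2, pvAFill W (s :: t')]
    simp only [List.foldl_cons, List.foldl_nil]
    rw [pvFtabZero, pvTabCons W r (s :: t') (by simp)]
    congr 1
    rw [PySem.List.pyGetD_zero]

-- ---- relating A's table to the truncated DP table ----
def pvRRel (W : Nat) (a d : List Int) : Prop := d.length = W ∧ ∀ w < W, a.getD w 0 = d.getD w 0

theorem pvGetD_append_left (xs ys : List Int) (w : Nat) (h : w < xs.length) :
    (xs ++ ys).getD w 0 = xs.getD w 0 := by
  simp [List.getD, List.getElem?_append_left, h]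

theorem pvGetD_take (r : List Int) (W w : Nat) (hw : w < W) :
    (r.take W).getD w 0 = r.getD w 0 := by
  simp [List.getD, hw]

theorem pvDpRowCongr (r bA bD : List Int) (W : Nat) (hW : 2 ≤ W)
    (hag : ∀ j < W, bA.getD j 0 = bD.getD j 0) : dpRowP r bA W = dpRowP r bD W := by
  unfold dpRowP
  refine List.map_congr_left (fun w hw => ?_)
  rw [pvNminCongr bA bD W w hW (List.mem_range.mp hw) hag]

theorem pvL1 (W : Nat) (hW : 2 ≤ W) : ∀ (e : List (List Int)), (∀ r ∈ e, W ≤ r.length) →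
    List.Forall₂ (pvRRel W) (tabOfP (W:Int) e) (dpRowsP W e)
  | [], _ => by simp [tabOfP, dpRowsP]
  | [r], hr => by
    have hrlen : W ≤ r.length := hr r (by simp)
    refine List.Forall₂.cons ⟨?_, fun w hw => (pvGetD_take r W w hw).symm⟩ List.Forall₂.nil
    simp [List.length_take, Nat.min_eq_left hrlen]
  | r :: s :: t', hr => by
    have hne : (s :: t') ≠ ([] : List (List Int)) := by simp
    have IH := pvL1 W hW (s :: t') (fun x hx => hr x (List.mem_cons_of_mem r hx))
    rw [pvTabCons (W:Int) r (s :: t') hne, pvDpRowsCons W r (s :: t') hne]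
    have hhead : pvRRel W ((tabOfP (W:Int) (s :: t')).getD 0 [])
        ((dpRowsP W (s :: t')).getD 0 []) := by
      rcases hx : tabOfP (W:Int) (s :: t') with _ | ⟨a0, arest⟩
      · exact absurd hx (pvTabNeNil _ _ hne)
      rcases hy : dpRowsP W (s :: t') with _ | ⟨d0, drest⟩
      · exact absurd hy (pvDpRowsNeNil _ _ hne)
      rw [hx, hy] at IH
      cases IH with
      | cons h1 _ => simpa using h1
    have hrlen : W ≤ r.length := hr r (by simp)
    refine List.Forall₂.cons ⟨by simp [dpRowP], fun w hw => ?_⟩ IH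
    rw [pvFillRowEq _ r W hW hrlen,
      pvDpRowCongr r _ _ W hW hhead.2,
      pvGetD_append_left _ _ w (by simp [dpRowP]; omega)]

theorem pvHeadEq (W : Nat) (hW : 2 ≤ W) (r0 : List Int) (t : List (List Int)) (ht : t ≠ [])
    (hr0 : r0.length = W) (hrows : ∀ r ∈ (r0 :: t), W ≤ r.length) :
    (tabOfP (W:Int) (r0 :: t)).getD 0 [] = (dpRowsP W (r0 :: t)).getD 0 [] := by
  have IH := pvL1 W hW t (fun x hx => hrows x (by simp [hx]))
  have hhead : pvRRel W ((tabOfP (W:Int) t).getD 0 []) ((dpRowsP W t).getD 0 []) := by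
    rcases hx : tabOfP (W:Int) t with _ | ⟨a0, arest⟩
    · exact absurd hx (pvTabNeNil _ _ ht)
    rcases hy : dpRowsP W t with _ | ⟨d0, drest⟩
    · exact absurd hy (pvDpRowsNeNil _ _ ht)
    rw [hx, hy] at IH
    cases IH with
    | cons h1 _ => simpa using h1
  rw [pvTabCons (W:Int) r0 t ht, pvDpRowsCons W r0 t ht]
  simp only [List.getD_cons_zero]
  rw [pvFillRowEq _ r0 W hW (by omega), pvDpRowCongr r0 _ _ W hW hhead.2, ← hr0,
    List.drop_length, List.append_nil]

-- ---- B's fold builds the same DP table with its parent rows ----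
theorem pvB1 (W : Nat) (hW : 2 ≤ W) : ∀ (l : List (List Int)) (lr : List Int),
    (l.reverse).foldl (pvStepB W) (lr.take W, []) =
      ((dpRowsP W (l ++ [lr])).getD 0 [], parsP W (l ++ [lr]))
  | [], lr => by simp [dpRowsP, parsP]
  | r :: l, lr => by
    rw [List.reverse_cons, List.foldl_append, pvB1 W hW l lr]
    simp only [List.foldl_cons, List.foldl_nil]
    have hne : l ++ [lr] ≠ ([] : List (List Int)) := by simp
    rw [show ((r :: l) ++ [lr]) = r :: (l ++ [lr]) from rfl,
      pvDpRowsCons W r _ hne, pvParsCons W r _ hne]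
    have hpar : (List.range W).map (fun w =>
        let lo := if w = 0 then 0 else w - 1
        let hi := if w = W - 1 then w else w + 1
        (List.range' (lo+1) (hi-lo)).foldl
          (fun best c => if ((dpRowsP W (l ++ [lr])).getD 0 []).getD c 0
            < ((dpRowsP W (l ++ [lr])).getD 0 []).getD best 0 then c else best) lo)
        = parRowP ((dpRowsP W (l ++ [lr])).getD 0 []) W := rfl
    unfold pvStepB
    simp only [hpar]
    have hnrow : (List.range W).map (fun w => r.getD w 0 +
        ((dpRowsP W (l ++ [lr])).getD 0 []).getD
          ((parRowP ((dpRowsP W (l ++ [lr])).getD 0 []) W).getD w 0) 0)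
        = dpRowP r ((dpRowsP W (l ++ [lr])).getD 0 []) W := by
      unfold dpRowP
      refine List.map_congr_left (fun w hw => ?_)
      have hwW := List.mem_range.mp hw
      rw [parRowP, PySem.List.getD_map_range _ W w 0 hwW, pvPickVal _ W w hW hwW]
    rw [hnrow]
    simp

-- ---- the trace invariant ----
theorem pvStartLt (row : List Int) (hne : row ≠ []) : pvStart row < row.length := by
  unfold pvStart
  cases hmin : PySem.List.min? row (fun x => x) with
  | none => exact absurd (by simpa [PySem.List.min?_eq_none_iff] using hmin) hne
  | some m =>
    have hmem : m ∈ row := PySem.List.min?_mem hmin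
    have hsome : (PySem.List.index? row m).isSome := by simp [hmem]
    cases hidx : PySem.List.index? row m with
    | none => rw [hidx] at hsome; simp at hsome
    | some k =>
      obtain ⟨hk, -, -⟩ := PySem.List.getElem_of_index?_eq_some hidx
      simp only [Option.getD_some]
      rw [hidx]
      simpa using hk

theorem pvTraceStep (W : Nat) (hW : 2 ≤ W) (a d rem : List Int) (s : List Int × Nat)
    (hrel : pvRRel W a d) (h1 : rem = s.1)
    (h2 : PySem.List.pyGetD rem (-1) 0 = (s.2:Int)) (h3 : s.2 < W) :
    pvTraceARow (W:Int) rem a = (pvTraceBStep s (parRowP d W)).1 ∧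
    PySem.List.pyGetD (pvTraceARow (W:Int) rem a) (-1) 0
      = ((pvTraceBStep s (parRowP d W)).2 : Int) ∧
    (pvTraceBStep s (parRowP d W)).2 < W := by
  have hc' : (parRowP d W).getD s.2 0 = pickP d W s.2 := by
    rw [parRowP, PySem.List.getD_map_range _ W _ 0 h3]
  have hnext : pvTraceARow (W:Int) rem a = rem ++ [((pickP d W s.2 : Nat) : Int)] := by
    simp only [pvTraceARow]
    rw [h2, pvAstepEq a d W s.2 hW h3 hrel.2]
  have hc2 : (parRowP d W)[s.2]?.getD 0 = pickP d W s.2 := by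
    simpa [List.getD] using hc'
  refine ⟨?_, ?_, ?_⟩
  · rw [hnext, h1]
    simp [pvTraceBStep, List.getD, hc2]
  · rw [hnext, PySem.List.pyGetD_neg_one_append_singleton]
    simp [pvTraceBStep, List.getD, hc2]
  · simp only [pvTraceBStep, List.getD, hc2]
    exact pvPickLt d W s.2 hW h3

theorem pvMainTall (r0 s0 : List Int) (t' : List (List Int))
    (hW : 2 ≤ r0.length)
    (hrows : ∀ r ∈ (r0 :: s0 :: t'), r0.length ≤ r.length) :
    findVerticalSeam (r0 :: s0 :: t') = findVerticalSeam_alt (r0 :: s0 :: t') := by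
  set e : List (List Int) := r0 :: s0 :: t' with he
  set W : Nat := r0.length with hWdef
  have hne : e ≠ [] := by simp [he]
  have htne : (s0 :: t') ≠ ([] : List (List Int)) := by simp
  have hW0 : PySem.List.pyGetD e 0 [] = r0 := by rw [he]; exact PySem.List.pyGetD_zero_cons _ _ _
  have hWlen : PySem.List.len (PySem.List.pyGetD e 0 []) = ((W : Nat) : Int) := by
    rw [hW0]; simp [PySem.List.len_eq, hWdef]
  -- A's table is the structural one
  have h1 : pvVer e = tabOfP ((W : Nat) : Int) e := by
    unfold pvVer
    rw [hWlen, pvAFill]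
  -- B's fold is the DP table with parents
  have h2 : pvStB e = ((dpRowsP W e).getD 0 [], parsP W e) := by
    unfold pvStB
    rw [PySem.List.slice_to_neg_one, PySem.List.pyGetD_neg_one _ _ hne, hW0, ← hWdef]
    have hB := pvB1 W hW e.dropLast (e.getLast hne)
    rw [List.dropLast_concat_getLast hne] at hB
    exact hB
  -- heads agree exactly
  have h3 : (tabOfP ((W : Nat) : Int) e).getD 0 [] = (dpRowsP W e).getD 0 [] := by
    rw [he]
    exact pvHeadEq W hW r0 (s0 :: t') htne hWdef.symm (by rw [← he]; exact hrows)
  -- the common start column and its bound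
  have hD0len : ((dpRowsP W e).getD 0 []).length = W := by
    rw [he, pvDpRowsCons W r0 _ htne]
    simp [dpRowP]
  have hD0ne : (dpRowsP W e).getD 0 [] ≠ [] := by
    intro hcon
    rw [hcon] at hD0len
    simp at hD0len
    omega
  have hc0 : pvStart ((dpRowsP W e).getD 0 []) < W := by
    have := pvStartLt _ hD0ne
    rwa [hD0len] at this
  -- compute both sides down to the two lockstep folds
  rw [pvA_unfold, pvB_unfold, h2, hWlen, h1, PySem.List.pyGetD_zero, h3]
  have hlent : PySem.List.len e = PySem.List.len (tabOfP ((W : Nat) : Int) e) := by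
    simp [PySem.List.len_eq, pvTabLen]
  rw [hlent,
    PySem.List.foldl_pyRange_pyGetD (tabOfP ((W : Nat) : Int) e) [] (pvTraceARow ((W : Nat) : Int))
      _ (by norm_num), pvParsEq W e, List.foldl_map]
  have htails : List.Forall₂ (pvRRel W) ((tabOfP ((W : Nat) : Int) e).drop (1:Int).toNat)
      ((dpRowsP W e).tail) := by
    rw [show ((1:Int).toNat) = 1 from rfl, ← List.drop_one]
    exact List.forall₂_drop 1 (pvL1 W hW e hrows)
  exact (pvFoldlRel
    (fun rem (sb : List Int × Nat) => rem = sb.1 ∧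
      PySem.List.pyGetD rem (-1) 0 = (sb.2 : Int) ∧ sb.2 < W)
    (pvRRel W) (pvTraceARow ((W : Nat) : Int)) (fun sb d => pvTraceBStep sb (parRowP d W))
    (fun b c a d hS hR => pvTraceStep W hW a d b c hS hR.1 hR.2.1 hR.2.2)
    htails
    (b := [((pvStart ((dpRowsP W e).getD 0 []) : Nat) : Int)])
    (c := ([((pvStart ((dpRowsP W e).getD 0 []) : Nat) : Int)],
      pvStart ((dpRowsP W e).getD 0 [])))
    ⟨rfl, PySem.List.pyGetD_neg_one_append_singleton [] _ _, hc0⟩).1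

theorem pvMainSingle (r0 : List Int) : findVerticalSeam [r0] = findVerticalSeam_alt [r0] := by
  rw [pvA_unfold, pvB_unfold]
  have hver : pvVer [r0] = [r0] := by
    unfold pvVer
    rw [pvAFill]
    rfl
  have hst : pvStB [r0] = (r0, []) := by
    unfold pvStB
    rw [PySem.List.slice_to_neg_one]
    simp only [List.dropLast, List.reverse_nil, List.foldl_nil]
    rw [PySem.List.pyGetD_neg_one _ _ (by simp), PySem.List.pyGetD_zero_cons]
    simp [List.getLast_singleton]
  rw [hver, hst, PySem.List.pyRange_one_eq_nil (by simp [PySem.List.len_eq]),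
    PySem.List.pyGetD_zero_cons]
  rfl
-- ===== VERDICT (by name: the statement is the Claim_ definition above) =====
theorem findVerticalSeam_spec : Claim_equal_findVerticalSeam := by
  intro e _hdom hpre
  unfold Spec_findVerticalSeam
  obtain ⟨hne, hr0ne, hcase⟩ := hpre
  cases e with
  | nil => exact absurd rfl hne
  | cons r0 t =>
    cases t with
    | nil => exact pvMainSingle r0
    | cons s0 t' =>
      rcases hcase with h1 | ⟨hW2, hrows⟩
      · simp at h1
      · exact pvMainTall r0 s0 t' (by simpa using hW2)
          (by intro r hr; simpa using hrows r hr)
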